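-- pv_equiv track=rewrite | github.com/swathiravi2911/Problems_Solving | Intermediate_Problems/Arrays_Carry_Forward/specialSequenceAG.py | solve
-- ===== SOURCE A (Python) =====
-- def solve(A):
--     N = len(A)
--     count_a = 0
--     answer = 0
--     for i in range(N):
--         if A[i] == 'A':
--             count_a += 1
--         elif A[i] == 'G':
--             answer += count_a
--     return answer
-- ===== SOURCE B (Python) =====
-- def solve(A):
--     return sum(A[:i].count('A') for i, ch in enumerate(A) if ch == 'G')
-- ===== Notes on version B (the rewrite author's own statement) =====
-- stated objective: idiomatic
-- what changed: Replaces the running carry-forward counter loop with a one-line generator sum that, at each 'G', re-derives the number of preceding 'A's by counting the prefix slice.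
import Mathlib
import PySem

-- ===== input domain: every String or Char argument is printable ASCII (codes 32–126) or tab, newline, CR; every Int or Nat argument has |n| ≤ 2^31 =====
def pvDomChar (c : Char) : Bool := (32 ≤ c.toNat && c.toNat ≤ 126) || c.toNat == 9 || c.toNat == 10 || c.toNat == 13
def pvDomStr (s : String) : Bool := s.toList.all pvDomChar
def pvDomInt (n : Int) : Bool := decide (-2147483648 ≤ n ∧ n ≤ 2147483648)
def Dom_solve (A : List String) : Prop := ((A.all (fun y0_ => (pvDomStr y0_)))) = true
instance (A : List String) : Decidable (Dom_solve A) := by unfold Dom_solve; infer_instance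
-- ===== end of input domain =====

-- B replaces A's single-pass carry-forward counter by an idiomatic generator sum
-- that re-counts the 'A's in the prefix slice at each 'G' (no running counter).

-- ===== PORT A =====
-- carry-forward loop: state (count_a, answer)
def solve (A : List String) : Int :=
  (A.foldl (fun (st : Int × Int) s =>
      if s == "A" then (st.1 + 1, st.2)
      else if s == "G" then (st.1, st.2 + st.1)
      else st) (0, 0)).2

-- ===== PORT B =====
-- sum(A[:i].count('A') for i, ch in enumerate(A) if ch == 'G')
def solve_alt (A : List String) : Int :=
  (((PySem.List.enumerate A 0).filter (fun p => p.2 == "G")).map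
      (fun p => ((PySem.List.slice A none (some p.1)).count "A" : Int))).sum

-- ===== PRECONDITION & SPEC =====
def Spec_solve (A : List String) (out : Int) : Prop := out = solve_alt A
instance (A : List String) (out : Int) : Decidable (Spec_solve A out) := by unfold Spec_solve; infer_instance

-- ===== CLAIM (what is proved, stated in full; the proofs are below) =====
def Claim_equal_solve : Prop := ∀ (A : List String), Dom_solve A → Spec_solve A (solve A)

-- ===== LEMMAS AND PROOFS =====

-- common recursive characterisation: answer with count_a seeded at c
def gAux : List String → Int → Int
  | [], _ => 0
  | s :: t, c => (if s == "G" then c else 0) + gAux t (c + (if s == "A" then 1 else 0))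

theorem solve_foldl_eq (l : List String) (c ans : Int) :
    (l.foldl (fun (st : Int × Int) s =>
        if s == "A" then (st.1 + 1, st.2)
        else if s == "G" then (st.1, st.2 + st.1)
        else st) (c, ans)).2 = ans + gAux l c := by
  induction l generalizing c ans with
  | nil => simp [gAux]
  | cons s t ih =>
    simp only [List.foldl_cons]
    by_cases hA : s == "A"
    · have hG : ¬ (s == "G") := by intro h; simp_all
      rw [if_pos hA, ih]
      simp [gAux, hA, hG]
    · by_cases hG : s == "G"
      · rw [if_neg hA, if_pos hG, ih]
        simp [gAux, hA, hG]; ring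
      · rw [if_neg hA, if_neg hG, ih]
        simp [gAux, hA, hG]

theorem enum_shift (t : List String) (n : Int) (f : Int → Int) :
    (((PySem.List.enumerate t (n + 1)).filter (fun p => p.2 == "G")).map
        (fun p => f p.1)).sum
      = (((PySem.List.enumerate t n).filter (fun p => p.2 == "G")).map
        (fun p => f (p.1 + 1))).sum := by
  induction t generalizing n f with
  | nil => simp [PySem.List.enumerate_nil]
  | cons s t ih =>
    simp only [PySem.List.enumerate_cons, List.filter_cons]
    have h := ih (n + 1) f
    by_cases hG : s == "G"
    · simp only [hG, if_pos, List.map_cons, List.sum_cons, h]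
    · simp only [hG, Bool.false_eq_true, if_false, h]

theorem solve_alt_aux (l : List String) (c : Int) :
    (((PySem.List.enumerate l 0).filter (fun p => p.2 == "G")).map
        (fun p => c + ((PySem.List.slice l none (some p.1)).count "A" : Int))).sum
      = gAux l c := by
  induction l generalizing c with
  | nil => simp [PySem.List.enumerate_nil, gAux]
  | cons s t ih =>
    have hshift := enum_shift t 0
      (fun i => c + ((PySem.List.slice (s :: t) none (some i)).count "A" : Int))
    have hcongr :
        (((PySem.List.enumerate t 0).filter (fun p => p.2 == "G")).map
            (fun p => c + ((PySem.List.slice (s :: t) none (some (p.1 + 1))).count "A" : Int)))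
          = (((PySem.List.enumerate t 0).filter (fun p => p.2 == "G")).map
            (fun p => (c + (if s == "A" then 1 else 0))
                + ((PySem.List.slice t none (some p.1)).count "A" : Int))) := by
      apply List.map_congr_left
      intro p hp
      have hp' : p ∈ PySem.List.enumerate t 0 := List.mem_of_mem_filter hp
      obtain ⟨k, hk, rfl⟩ := (PySem.List.mem_enumerate_iff t 0 p).1 hp'
      have h1 : PySem.List.slice (s :: t) none (some ((0 : Int) + (k : Int) + 1))
          = s :: t.take k := by
        have he : ((0 : Int) + (k : Int) + 1) = ((k + 1 : Nat) : Int) := by push_cast; ring_nf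
        rw [he, PySem.List.slice_to_natCast]
        simp [List.take_succ_cons]
      have h2 : PySem.List.slice t none (some ((0 : Int) + (k : Int)))
          = t.take k := by
        have he : ((0 : Int) + (k : Int)) = ((k : Nat) : Int) := by ring_nf
        rw [he, PySem.List.slice_to_natCast]
      simp only [h1, h2]
      by_cases hA : s == "A"
      · have hA' : s = "A" := by simpa using hA
        simp [hA']; ring
      · have hA' : s ≠ "A" := by simpa using hA
        simp [hA', hA]
    have hhead : PySem.List.slice (s :: t) none (some (0 : Int)) = ([] : List String) := by
      have he : (0 : Int) = ((0 : Nat) : Int) := rfl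
      rw [he, PySem.List.slice_to_natCast]; simp
    simp only [PySem.List.enumerate_cons, List.filter_cons]
    by_cases hG : s == "G"
    · have hA : ¬ (s == "A") := by intro h; simp_all
      simp only [hG, if_pos, List.map_cons, List.sum_cons, hshift, hcongr, ih, hhead]
      simp [gAux, hG, hA]
    · simp only [hG, Bool.false_eq_true, if_false, hshift, hcongr, ih]
      simp [gAux, hG]

-- ===== VERDICT (by name: the statement is the Claim_ definition above) =====
theorem solve_spec : Claim_equal_solve := by
  intro A _
  unfold Spec_solve solve solve_alt
  rw [solve_foldl_eq A 0 0]
  have h := solve_alt_aux A 0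
  simp only [zero_add] at h
  rw [zero_add, ← h]
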